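-- pv_equiv track=rewrite | github.com/reox/arls | src/arls/_utils.py | decide_width
-- ===== SOURCE A (Python) =====
-- def decide_width(mg):
--     widths = ((2, 1),
--               (8, 2),
--               (12, 3),
--               (20, 4),
--               (28, 5),
--               (36, 6),
--               (50, 7),
--               (64, 8),
--               (80, 9),
--               (200, 10),
--               (300, 12),
--               (400, 14),
--               (1000, 16))
--     for lim_mg, width in widths:
--         if mg <= lim_mg:
--             return width
--     # Larger than the maximum
--     return 20
-- ===== SOURCE B (Python) =====
-- import bisect
--
-- _LIMITS = [2, 8, 12, 20, 28, 36, 50, 64, 80, 200, 300, 400, 1000]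
-- _WIDTHS = [1, 2, 3, 4, 5, 6, 7, 8, 9, 10, 12, 14, 16]
--
-- def decide_width(mg):
--     i = bisect.bisect_left(_LIMITS, mg)
--     return _WIDTHS[i] if i < len(_WIDTHS) else 20
-- ===== Notes on version B (the rewrite author's own statement) =====
-- stated objective: idiomatic
-- what changed: Replaces the linear scan over (limit, width) pairs by bisect.bisect_left binary search on a sorted limits list with a parallel widths list.
import Mathlib
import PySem

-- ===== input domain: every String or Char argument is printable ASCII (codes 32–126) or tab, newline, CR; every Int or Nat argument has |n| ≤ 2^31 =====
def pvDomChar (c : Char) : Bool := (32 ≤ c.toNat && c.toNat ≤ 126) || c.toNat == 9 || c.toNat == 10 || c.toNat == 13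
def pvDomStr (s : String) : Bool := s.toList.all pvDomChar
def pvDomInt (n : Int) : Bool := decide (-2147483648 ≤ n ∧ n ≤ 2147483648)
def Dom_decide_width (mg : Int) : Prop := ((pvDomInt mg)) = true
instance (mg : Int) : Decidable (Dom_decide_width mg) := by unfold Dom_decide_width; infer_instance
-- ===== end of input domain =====

-- B replaces A's linear scan with bisect_left binary search over a sorted limits list (idiomatic); same value on every int.

-- ===== PORT A =====
-- the literal (limit, width) table of A
def pvWidthsA : List (Int × Int) :=
  [(2, 1), (8, 2), (12, 3), (20, 4), (28, 5), (36, 6), (50, 7),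
   (64, 8), (80, 9), (200, 10), (300, 12), (400, 14), (1000, 16)]

-- the for-loop with early return: scan the table, return the first width whose limit admits mg
def pvScanA (mg : Int) : List (Int × Int) → Int
  | [] => 20
  | (lim, w) :: rest => if mg ≤ lim then w else pvScanA mg rest

def decide_width (mg : Int) : Int := pvScanA mg pvWidthsA

-- ===== PORT B =====
def pvLimits : List Int := [2, 8, 12, 20, 28, 36, 50, 64, 80, 200, 300, 400, 1000]
def pvWidths : List Int := [1, 2, 3, 4, 5, 6, 7, 8, 9, 10, 12, 14, 16]

-- bisect.bisect_left: binary search for the insertion point of x in xs[lo:hi]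
def pvBisectLeft (xs : List Int) (x : Int) (lo hi : Nat) : Nat :=
  if _h : lo < hi then
    if xs.getD ((lo + hi) / 2) 0 < x then pvBisectLeft xs x ((lo + hi) / 2 + 1) hi
    else pvBisectLeft xs x lo ((lo + hi) / 2)
  else lo
termination_by hi - lo
decreasing_by all_goals omega

def decide_width_alt (mg : Int) : Int :=
  let i := pvBisectLeft pvLimits mg 0 pvLimits.length
  if i < pvWidths.length then pvWidths.getD i 0 else 20

-- ===== PRECONDITION & SPEC =====
def Spec_decide_width (mg : Int) (out : Int) : Prop := out = decide_width_alt mg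
instance (mg : Int) (out : Int) : Decidable (Spec_decide_width mg out) := by unfold Spec_decide_width; infer_instance

-- ===== CLAIM (what is proved, stated in full; the proofs are below) =====
def Claim_equal_decide_width : Prop := ∀ (mg : Int), Dom_decide_width mg → Spec_decide_width mg (decide_width mg)

-- ===== LEMMAS AND PROOFS =====

-- ===== VERDICT (by name: the statement is the Claim_ definition above) =====
set_option maxRecDepth 8000 in
set_option maxHeartbeats 2000000 in
theorem decide_width_spec : Claim_equal_decide_width := by
  intro mg _
  unfold Spec_decide_width decide_width decide_width_alt
  simp [pvScanA, pvBisectLeft, pvWidthsA, pvLimits, pvWidths]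
  split_ifs <;> simp_all <;> omega
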